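-- pv_equiv track=rewrite | github.com/BondarenkoCom/AIJobSearcher | scripts/linkedin_comment_batch.py | _split_emails
-- ===== SOURCE A (Python) =====
-- from typing import Any, Dict, List, Optional, Tuple
--
-- def _split_emails(value: str) -> List[str]:
--     out: List[str] = []
--     for part in (value or "").split(";"):
--         e = (part or "").strip().lower()
--         if e:
--             out.append(e)
--     # Prefer non-generic addresses first.
--     out = sorted(set(out))
--     return out[:5]
-- ===== SOURCE B (Python) =====
-- from typing import List, Optional
--
-- def _split_emails(value: str) -> List[str]:
--     cleaned: List[str] = []
--     for part in (value or "").split(";"):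
--         e = (part or "").strip().lower()
--         if e:
--             cleaned.append(e)
--     # Selection without sorting: repeatedly pick the smallest address
--     # strictly greater than the last one kept, at most five times.
--     result: List[str] = []
--     last: Optional[str] = None
--     while len(result) < 5:
--         best: Optional[str] = None
--         for e in cleaned:
--             if (last is None or e > last) and (best is None or e < best):
--                 best = e
--         if best is None:
--             break
--         result.append(best)
--         last = best
--     return result
-- ===== Notes on version B (the rewrite author's own statement) =====
-- stated objective: alternative
-- what changed: Replaces A's set-dedup + full sort + slice with a sort-free repeated minimum-selection: up to five linear scans, each picking the smallest address strictly greater than the last one kept, which yields the five smallest distinct addresses directly.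
import Mathlib
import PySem

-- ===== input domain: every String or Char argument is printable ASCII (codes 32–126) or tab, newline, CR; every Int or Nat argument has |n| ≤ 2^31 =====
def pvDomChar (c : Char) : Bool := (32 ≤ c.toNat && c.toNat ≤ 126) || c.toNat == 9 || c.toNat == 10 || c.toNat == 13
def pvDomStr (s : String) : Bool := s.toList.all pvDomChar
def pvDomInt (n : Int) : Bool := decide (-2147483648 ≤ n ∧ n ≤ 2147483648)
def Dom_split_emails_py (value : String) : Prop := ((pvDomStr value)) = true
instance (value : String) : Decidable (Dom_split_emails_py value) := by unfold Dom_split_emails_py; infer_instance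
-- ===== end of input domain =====

-- B replaces A's set-dedup + full sort + slice with a sort-free repeated minimum-selection:
-- up to five linear scans, each picking the smallest address strictly above the last kept one.

-- ===== PORT A =====
def split_emails_py (value : String) : List String :=
  let out := ((PySem.Str.split? value ";").getD []).foldl
    (fun acc part =>
      let e := PySem.Str.lower (PySem.Str.strip part)
      if e ≠ "" then acc ++ [e] else acc) []
  -- split? is always `some` here (separator ";" is nonempty); getD only totalizes
  let out2 := PySem.List.sorted (PySem.Set.ofList out) (fun x => x)
  PySem.List.slice out2 none (some 5)

-- ===== PORT B =====
-- `last is None or e > last`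
def pvAbove (last : Option String) (e : String) : Bool :=
  match last with
  | none => true
  | some l => decide (l < e)

-- one update step of the inner for-loop over `cleaned`
def pvStep (last : Option String) (best : Option String) (e : String) : Option String :=
  if pvAbove last e && (match best with | none => true | some b => decide (e < b)) then some e
  else best

-- the inner for-loop: smallest element strictly above `last` (none if there is none)
def pvBest (last : Option String) (cleaned : List String) : Option String :=
  cleaned.foldl (pvStep last) none

-- the while-loop: at most `k` more selections, `last` = previously kept element
def pvSelect : Nat → Option String → List String → List String
  | 0, _, _ => []
  | Nat.succ k, last, cleaned =>
    match pvBest last cleaned with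
    | none => []
    | some b => b :: pvSelect k (some b) cleaned

def split_emails_py_alt (value : String) : List String :=
  let cleaned := ((PySem.Str.split? value ";").getD []).foldl
    (fun acc part =>
      let e := PySem.Str.lower (PySem.Str.strip part)
      if e ≠ "" then acc ++ [e] else acc) []
  pvSelect 5 none cleaned

-- ===== PRECONDITION & SPEC =====
def Spec_split_emails_py (value : String) (out : List String) : Prop := out = split_emails_py_alt value
instance (value : String) (out : List String) : Decidable (Spec_split_emails_py value out) := by unfold Spec_split_emails_py; infer_instance

-- ===== CLAIM (what is proved, stated in full; the proofs are below) =====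
def Claim_equal_split_emails_py : Prop := ∀ (value : String), Dom_split_emails_py value → Spec_split_emails_py value (split_emails_py value)

-- ===== LEMMAS AND PROOFS =====

-- the inner fold computes the minimum of the elements above `last` (seeded with `acc`)
lemma pvBest_foldl (last : Option String) (xs : List String) : ∀ acc : Option String,
    xs.foldl (pvStep last) acc = (acc.toList ++ xs.filter (pvAbove last)).min? := by
  induction xs with
  | nil => intro acc; cases acc <;> simp [List.min?]
  | cons e xs ih =>
    intro acc
    by_cases ha : pvAbove last e
    · cases acc with
      | none =>
        simp only [List.foldl_cons, pvStep, ha, Bool.true_and,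
          List.filter_cons_of_pos ha, ih]
        rfl
      | some b =>
        by_cases heb : e < b
        · simp only [List.foldl_cons, pvStep, ha, Bool.true_and, decide_eq_true heb,
            List.filter_cons_of_pos ha, ih]
          simp [List.min?, min_eq_right (le_of_lt heb)]
        · have hd : decide (e < b) = false := decide_eq_false heb
          simp only [List.foldl_cons, pvStep, ha, Bool.true_and, hd, Bool.false_eq_true,
            if_false, List.filter_cons_of_pos ha, ih]
          simp [List.min?, min_eq_left (le_of_not_gt heb)]
    · have ha' : pvAbove last e = false := by simpa using ha
      have hstep : pvStep last acc e = acc := by simp [pvStep, ha']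
      simp only [List.foldl_cons, hstep, List.filter_cons, ha', Bool.false_eq_true,
        if_false, ih]

-- min? depends only on which elements occur
lemma pvMin?_congr (l l' : List String) (h : ∀ a, a ∈ l ↔ a ∈ l') : l.min? = l'.min? := by
  cases h1 : l.min? with
  | none =>
    rw [List.min?_eq_none_iff] at h1
    subst h1
    have : l' = [] := List.eq_nil_iff_forall_not_mem.mpr
      (fun a ha => absurd ((h a).mpr ha) (List.not_mem_nil))
    simp [this]
  | some a =>
    rw [List.min?_eq_some_iff] at h1
    exact (List.min?_eq_some_iff.mpr
      ⟨(h a).mp h1.1, fun b hb => h1.2 b ((h b).mpr hb)⟩).symm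

lemma pvFoldl_min_of_le (h : String) : ∀ t : List String, (∀ x ∈ t, h ≤ x) → t.foldl min h = h := by
  intro t
  induction t with
  | nil => intro _; rfl
  | cons x t ih =>
    intro hx
    have hmin : min h x = h := min_eq_left (hx x List.mem_cons_self)
    simp only [List.foldl_cons, hmin]
    exact ih (fun y hy => hx y (List.mem_cons_of_mem _ hy))

-- on a ≤-sorted list, min? is head?
lemma pvMin?_eq_head? (l : List String) (h : l.Pairwise (· ≤ ·)) : l.min? = l.head? := by
  cases l with
  | nil => rfl
  | cons a t =>
    simp only [List.min?, List.head?]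
    exact congrArg some (pvFoldl_min_of_le a t (List.pairwise_cons.mp h).1)

-- the selection loop returns the first k elements of sorted(set(cleaned)) above `last`
lemma pvSelect_eq (cleaned : List String) : ∀ (k : Nat) (last : Option String),
    pvSelect k last cleaned =
      ((PySem.List.sorted (PySem.Set.ofList cleaned) (fun x => x)).filter (pvAbove last)).take k := by
  intro k
  induction k with
  | zero => intro last; simp [pvSelect]
  | succ k ih =>
    intro last
    set L := PySem.List.sorted (PySem.Set.ofList cleaned) (fun x => x) with hL
    have hmem : ∀ a, a ∈ L ↔ a ∈ cleaned := by
      intro a; rw [hL, PySem.List.mem_sorted, PySem.Set.mem_ofList]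
    have hlt : L.Pairwise (· < ·) := PySem.List.sorted_ofList_pairwise_lt cleaned
    have hb : pvBest last cleaned = (L.filter (pvAbove last)).head? := by
      rw [pvBest, pvBest_foldl last cleaned none, Option.toList_none, List.nil_append,
        pvMin?_congr (cleaned.filter (pvAbove last)) (L.filter (pvAbove last))
          (fun a => by simp [List.mem_filter, hmem])]
      exact pvMin?_eq_head? _ ((hlt.filter _).imp le_of_lt)
    cases hf : L.filter (pvAbove last) with
    | nil =>
      have : pvBest last cleaned = none := by rw [hb, hf]; rfl
      simp [pvSelect, this]
    | cons b rest =>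
      have hbv : pvBest last cleaned = some b := by rw [hb, hf]; rfl
      have hbmem : b ∈ L.filter (pvAbove last) := by rw [hf]; exact List.mem_cons_self
      have hbL : pvAbove last b = true := (List.mem_filter.mp hbmem).2
      have hpw : (b :: rest).Pairwise (· < ·) := hf ▸ hlt.filter _
      have hrest : L.filter (pvAbove (some b)) = rest := by
        have h1 : L.filter (pvAbove (some b)) =
            (L.filter (pvAbove last)).filter (pvAbove (some b)) := by
          rw [List.filter_filter]
          refine List.filter_congr (fun e _ => ?_)
          by_cases hbe : b < e
          · have h2 : pvAbove last e = true := by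
              cases last with
              | none => rfl
              | some l =>
                have hl : l < b := of_decide_eq_true hbL
                exact decide_eq_true (lt_trans hl hbe)
            rw [h2, Bool.and_true]
          · have h3 : pvAbove (some b) e = false := decide_eq_false hbe
            rw [h3, Bool.false_and]
        rw [h1, hf]
        have hbb : pvAbove (some b) b = false := by simp [pvAbove]
        rw [List.filter_cons_of_neg (by simp [hbb])]
        exact List.filter_eq_self.mpr
          (fun a ha => decide_eq_true ((List.pairwise_cons.mp hpw).1 a ha))
      simp only [pvSelect, hbv, ih (some b), hrest, List.take_succ_cons]

-- ===== VERDICT (by name: the statement is the Claim_ definition above) =====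
theorem split_emails_py_spec : Claim_equal_split_emails_py := by
  intro value _
  unfold Spec_split_emails_py split_emails_py split_emails_py_alt
  dsimp only
  rw [PySem.List.slice_to _ (by norm_num : (0:Int) ≤ 5), pvSelect_eq]
  have : ∀ L : List String, L.filter (pvAbove none) = L := by
    intro L; exact List.filter_eq_self.mpr (fun a _ => rfl)
  rw [this]
  rfl
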